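-- pv_equiv track=rewrite | github.com/Arierrot/EyeAutoReport | src/eye_report_utils.py | detectar_picos
-- ===== SOURCE A (Python) =====
-- def detectar_picos(columna, n_picos=3, min_dist=20):
--     """
--     Función para detectar las posiciones de los primeros picos no nulos en una columna.
--
--     Parámetros:
--     - columna: vector de intensidades (vertical).
--     - n_picos: número de picos a detectar.
--     - min_dist: distancia mínima entre picos.
--
--     Devuelve:
--     - picos: lista con las posiciones de los picos detectados.
--     """
--
--     picos = []
--
--     for i in range(len(columna)):
--         # Si el valor es distinto de cero y aún no se han encontrado todos los picos
--         if columna[i] != 0 and len(picos) < n_picos: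
--             # Si es el primer pico, añadirlo
--             if len(picos) == 0:
--                 picos.append(i)
--             # Si hay otros picos, comprobar que esté a suficiente distancia del anterior
--             elif abs(i - picos[-1]) >= min_dist:
--                 picos.append(i)
--     # Devuelve los picos encontrados
--     return picos
-- ===== SOURCE B (Python) =====
-- def detectar_picos(columna, n_picos=3, min_dist=20):
--     """Jump-scan: instead of testing every position against the running peak
--     list, keep a cursor; repeatedly advance it to the next non-zero cell,
--     record that position, and jump the cursor forward by max(min_dist, 1)."""
--     picos = []
--     step = min_dist if min_dist > 1 else 1
--     p = 0
--     while len(picos) < n_picos: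
--         while p < len(columna) and columna[p] == 0:
--             p += 1
--         if p >= len(columna):
--             break
--         picos.append(p)
--         p += step
--     return picos
-- ===== Notes on version B (the rewrite author's own statement) =====
-- stated objective: faster
-- what changed: A scans every position and re-tests the peak list's length and last element at each index; B keeps a cursor and a jump size max(min_dist,1): it repeatedly advances the cursor to the next non-zero cell, records it, and jumps the cursor past the exclusion window, so positions inside a window are never examined and per-position list bookkeeping disappears.
import Mathlib
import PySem

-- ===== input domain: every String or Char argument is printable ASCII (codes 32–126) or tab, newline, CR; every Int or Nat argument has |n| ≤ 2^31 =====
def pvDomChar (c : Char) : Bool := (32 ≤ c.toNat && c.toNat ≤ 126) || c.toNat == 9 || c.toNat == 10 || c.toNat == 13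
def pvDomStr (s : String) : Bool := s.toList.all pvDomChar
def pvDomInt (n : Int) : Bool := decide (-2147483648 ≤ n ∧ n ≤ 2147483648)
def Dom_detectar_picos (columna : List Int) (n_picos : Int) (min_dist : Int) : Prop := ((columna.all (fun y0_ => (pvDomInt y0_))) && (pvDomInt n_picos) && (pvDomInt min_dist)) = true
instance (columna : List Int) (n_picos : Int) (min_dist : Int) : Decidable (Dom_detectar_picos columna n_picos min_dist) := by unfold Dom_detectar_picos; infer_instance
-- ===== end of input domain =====

-- B replaces A's per-position scan (testing every index against the peak list) by a cursor
-- that jumps: find the next non-zero cell, record it, skip forward by max(min_dist, 1)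
-- (measurably faster by a constant factor: windowed positions are never examined).

-- ===== PORT A =====
-- for i in range(len(columna)): if columna[i] != 0 and len(picos) < n_picos: …
def detectar_picos (columna : List Int) (n_picos : Int) (min_dist : Int) : List Int :=
  (PySem.List.pyRange 0 (PySem.List.len columna) 1).foldl
    (fun picos i =>
      if PySem.List.pyGetD columna i 0 ≠ 0 ∧ PySem.List.len picos < n_picos then
        if PySem.List.len picos = 0 then picos ++ [i]
        else if min_dist ≤ |i - PySem.List.pyGetD picos (-1) 0| then picos ++ [i]
        else picos
      else picos) []

-- ===== PORT B =====
-- step = min_dist if min_dist > 1 else 1   (as a Nat: min_dist > 1 in that branch)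
def pvStepSize (min_dist : Int) : Nat := if 1 < min_dist then min_dist.toNat else 1

-- inner while: advance the cursor to the next non-zero cell (or to len(columna));
-- fuel only bounds the iteration count (it never runs out for the fuel passed in)
def pvFind (columna : List Int) (fuel : Nat) (p : Nat) : Nat :=
  match fuel with
  | 0 => p
  | f + 1 =>
    if p < columna.length then
      if columna.getD p 0 = 0 then pvFind columna f (p + 1) else p
    else p

-- outer while: record the found peak and jump the cursor past the exclusion window
def pvLoop (columna : List Int) (n_picos : Int) (min_dist : Int)
    (fuel : Nat) (picos : List Int) (p : Nat) : List Int :=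
  match fuel with
  | 0 => picos
  | f + 1 =>
    if PySem.List.len picos < n_picos then
      if columna.length ≤ pvFind columna (columna.length - p) p then picos
      else
        pvLoop columna n_picos min_dist f
          (picos ++ [(pvFind columna (columna.length - p) p : Int)])
          (pvFind columna (columna.length - p) p + pvStepSize min_dist)
    else picos

def detectar_picos_alt (columna : List Int) (n_picos : Int) (min_dist : Int) : List Int :=
  pvLoop columna n_picos min_dist (columna.length + 1) [] 0

-- ===== PRECONDITION & SPEC =====
def Spec_detectar_picos (columna : List Int) (n_picos : Int) (min_dist : Int) (out : List Int) : Prop := out = detectar_picos_alt columna n_picos min_dist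
instance (columna : List Int) (n_picos : Int) (min_dist : Int) (out : List Int) : Decidable (Spec_detectar_picos columna n_picos min_dist out) := by unfold Spec_detectar_picos; infer_instance

-- ===== CLAIM (what is proved, stated in full; the proofs are below) =====
def Claim_equal_detectar_picos : Prop := ∀ (columna : List Int) (n_picos : Int) (min_dist : Int), Dom_detectar_picos columna n_picos min_dist → Spec_detectar_picos columna n_picos min_dist (detectar_picos columna n_picos min_dist)

-- ===== LEMMAS AND PROOFS =====

theorem pvStepSize_pos (min_dist : Int) : 1 ≤ pvStepSize min_dist := by
  unfold pvStepSize; split <;> omega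

theorem pv_getD_neg_one_append (l : List Int) (x : Int) :
    PySem.List.pyGetD (l ++ [x]) (-1) 0 = x := by
  simp [PySem.List.pyGetD, PySem.List.pyGet?, PySem.List.pyIdx?]

-- the list of indices of the non-zero entries (proof-side intermediate)
def pvNonzeros (columna : List Int) : List Int :=
  (PySem.List.enumerate columna 0).foldl
    (fun acc p => if p.2 ≠ 0 then acc ++ [p.1] else acc) []

-- A's running loop, reformulated as a greedy pass over the non-zero indices
def pvGreedy (nz : List Int) (n_picos : Int) (min_dist : Int) (picos : List Int) : List Int :=
  match nz with
  | [] => picos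
  | i :: rest =>
    if n_picos ≤ PySem.List.len picos then picos
    else if picos = [] ∨ min_dist ≤ i - PySem.List.pyGetD picos (-1) 0 then
      pvGreedy rest n_picos min_dist (picos ++ [i])
    else pvGreedy rest n_picos min_dist picos

-- A's per-element step once the non-zero test has been factored out
def pvStep (n_picos : Int) (min_dist : Int) (picos : List Int) (i : Int) : List Int :=
  if PySem.List.len picos < n_picos then
    if PySem.List.len picos = 0 then picos ++ [i]
    else if min_dist ≤ |i - PySem.List.pyGetD picos (-1) 0| then picos ++ [i]
    else picos
  else picos

theorem pv_foldl_full (nz : List Int) (n d : Int) (picos : List Int)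
    (h : ¬ PySem.List.len picos < n) :
    nz.foldl (pvStep n d) picos = picos := by
  induction nz with
  | nil => rfl
  | cons i rest ih =>
    have hstep : pvStep n d picos i = picos := by unfold pvStep; rw [if_neg h]
    rw [List.foldl_cons, hstep, ih]

theorem pv_core (nz : List Int) (n d : Int) (picos : List Int)
    (hs : nz.Pairwise (· < ·))
    (hinv : picos = [] ∨ ∀ x ∈ nz, PySem.List.pyGetD picos (-1) 0 ≤ x) :
    nz.foldl (pvStep n d) picos = pvGreedy nz n d picos := by
  induction nz generalizing picos with
  | nil => rfl
  | cons i rest ih =>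
    rcases List.pairwise_cons.mp hs with ⟨hi, hrest⟩
    by_cases hn : n ≤ PySem.List.len picos
    · have hnlt : ¬ PySem.List.len picos < n := by omega
      have hstep : pvStep n d picos i = picos := by unfold pvStep; rw [if_neg hnlt]
      rw [pvGreedy, if_pos hn, List.foldl_cons, hstep, pv_foldl_full rest n d picos hnlt]
    · have hlt : PySem.List.len picos < n := by omega
      rw [pvGreedy, if_neg hn, List.foldl_cons]
      by_cases hp : picos = []
      · subst hp
        have hcond : ([] : List Int) = [] ∨ d ≤ i - PySem.List.pyGetD ([] : List Int) (-1) 0 :=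
          Or.inl rfl
        rw [if_pos hcond]
        have hlt' : (0 : Int) < n := by simpa [PySem.List.len] using hlt
        have hstep : pvStep n d [] i = [] ++ [i] := by
          simp [pvStep, PySem.List.len, hlt']
        rw [hstep]
        refine ih _ hrest (Or.inr ?_)
        intro x hx
        have : PySem.List.pyGetD (([] : List Int) ++ [i]) (-1) 0 = i := pv_getD_neg_one_append [] i
        rw [this]
        exact le_of_lt (hi x hx)
      · have hinv' : ∀ x ∈ i :: rest, PySem.List.pyGetD picos (-1) 0 ≤ x := hinv.resolve_left hp
        have hlast : PySem.List.pyGetD picos (-1) 0 ≤ i := hinv' i (List.mem_cons_self)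
        have habs : |i - PySem.List.pyGetD picos (-1) 0| = i - PySem.List.pyGetD picos (-1) 0 :=
          abs_of_nonneg (by omega)
        have hlen0 : ¬ PySem.List.len picos = 0 := by
          simpa [PySem.List.len, List.length_eq_zero_iff] using hp
        by_cases hd : d ≤ i - PySem.List.pyGetD picos (-1) 0
        · have hstep : pvStep n d picos i = picos ++ [i] := by
            rw [pvStep, if_pos hlt, if_neg hlen0, habs, if_pos hd]
          rw [if_pos (Or.inr hd), hstep]
          refine ih _ hrest (Or.inr ?_)
          intro x hx
          rw [pv_getD_neg_one_append]
          exact le_of_lt (hi x hx)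
        · have hstep : pvStep n d picos i = picos := by
            rw [pvStep, if_pos hlt, if_neg hlen0, habs, if_neg hd]
          rw [if_neg (fun h => h.elim hp hd), hstep]
          refine ih _ hrest (Or.inr ?_)
          intro x hx
          exact hinv' x (List.mem_cons_of_mem i hx)

theorem pv_A_eq_greedy (columna : List Int) (n d : Int) :
    detectar_picos columna n d = pvGreedy (pvNonzeros columna) n d [] := by
  have h1 : detectar_picos columna n d =
      (PySem.List.enumerate columna 0).foldl
        (fun picos p =>
          if p.2 ≠ 0 ∧ PySem.List.len picos < n then
            if PySem.List.len picos = 0 then picos ++ [p.1]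
            else if d ≤ |p.1 - PySem.List.pyGetD picos (-1) 0| then picos ++ [p.1]
            else picos
          else picos) [] := by
    rw [PySem.List.enumerate_eq_map_pyRange columna 0, List.foldl_map]
    rfl
  have h2 : (fun (picos : List Int) (p : Int × Int) =>
        if p.2 ≠ 0 ∧ PySem.List.len picos < n then
          if PySem.List.len picos = 0 then picos ++ [p.1]
          else if d ≤ |p.1 - PySem.List.pyGetD picos (-1) 0| then picos ++ [p.1]
          else picos
        else picos)
      = (fun (picos : List Int) (p : Int × Int) =>
          if p.2 ≠ 0 then pvStep n d picos p.1 else picos) := by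
    funext picos p
    by_cases hv : p.2 ≠ 0
    · simp only [hv, true_and, if_true, ne_eq, not_false_eq_true]
      unfold pvStep
      by_cases hl : PySem.List.len picos < n
      · rw [if_pos hl]
      · rw [if_neg hl]
    · simp [hv]
  have h3 : pvNonzeros columna =
      ((PySem.List.enumerate columna 0).filter (fun p => decide (p.2 ≠ 0))).map Prod.fst := by
    unfold pvNonzeros
    rw [PySem.List.foldl_append_ite (fun p : Int × Int => p.2 ≠ 0) Prod.fst]
    rfl
  have hpw : (((PySem.List.enumerate columna 0).filter (fun p => decide (p.2 ≠ 0))).map Prod.fst).Pairwise (· < ·) := by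
    rw [List.pairwise_map]
    exact (PySem.List.pairwise_lt_enumerate columna 0).filter _
  rw [h1, h2, PySem.List.foldl_ite_eq_foldl_filter (fun p : Int × Int => p.2 ≠ 0)
        (fun acc p => pvStep n d acc p.1)]
  have h4 : List.foldl (fun acc (p : Int × Int) => pvStep n d acc p.1) []
      ((PySem.List.enumerate columna 0).filter (fun p => decide (p.2 ≠ 0)))
      = List.foldl (pvStep n d) []
        (((PySem.List.enumerate columna 0).filter (fun p => decide (p.2 ≠ 0))).map Prod.fst) := by
    rw [List.foldl_map]
  rw [h4, ← h3]
  exact pv_core _ n d [] (by rw [h3]; exact hpw) (Or.inl rfl)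

-- facts about the non-zero index list
theorem pv_nz_eq (columna : List Int) : pvNonzeros columna =
    ((PySem.List.enumerate columna 0).filter (fun p => decide (p.2 ≠ 0))).map Prod.fst := by
  unfold pvNonzeros
  rw [PySem.List.foldl_append_ite (fun p : Int × Int => p.2 ≠ 0) Prod.fst]
  rfl

theorem pv_nz_sorted (columna : List Int) : (pvNonzeros columna).Pairwise (· < ·) := by
  rw [pv_nz_eq, List.pairwise_map]
  exact (PySem.List.pairwise_lt_enumerate columna 0).filter _

theorem pv_nz_mem (columna : List Int) (i : Int) :
    i ∈ pvNonzeros columna ↔ ∃ (j : Nat), j < columna.length ∧ i = (j : Int) ∧ columna.getD j 0 ≠ 0 := by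
  rw [pv_nz_eq]
  simp only [List.mem_map, List.mem_filter, PySem.List.mem_enumerate_iff]
  constructor
  · rintro ⟨⟨a, b⟩, ⟨⟨k, hk, heq⟩, hb⟩, rfl⟩
    cases heq
    exact ⟨k, hk, by simp, by simpa [List.getD_eq_getElem?_getD, List.getElem?_eq_getElem hk] using of_decide_eq_true hb⟩
  · rintro ⟨j, hj, rfl, hz⟩
    exact ⟨((j : Int), columna[j]), ⟨⟨j, hj, by simp⟩, by simpa [List.getD_eq_getElem?_getD, List.getElem?_eq_getElem hj] using hz⟩, rfl⟩

-- dropWhile facts specialised to the threshold predicate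
theorem pv_dw_nil (l : List Int) (t : Int) (h : ∀ i ∈ l, i < t) :
    l.dropWhile (fun i => decide (i < t)) = [] := by
  rw [List.dropWhile_eq_nil_iff]; simpa using h

theorem pv_dw_all (l : List Int) (t : Int) (h : ∀ i ∈ l, ¬ i < t) :
    l.dropWhile (fun i => decide (i < t)) = l := by
  cases l with
  | nil => rfl
  | cons x xs => rw [List.dropWhile_cons]; simp [h x (by simp)]

theorem pv_dw_skip (l : List Int) (t : Int) (h : t ∉ l) :
    l.dropWhile (fun i => decide (i < t)) = l.dropWhile (fun i => decide (i < t + 1)) := by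
  induction l with
  | nil => rfl
  | cons x xs ih =>
    rw [List.dropWhile_cons, List.dropWhile_cons]
    have hx : x ≠ t := fun e => h (e ▸ List.mem_cons_self)
    by_cases hxt : x < t
    · have : x < t + 1 := by omega
      simp only [hxt, this, decide_true, if_true]
      exact ih (fun hm => h (List.mem_cons_of_mem _ hm))
    · have : ¬ x < t + 1 := by omega
      simp [hxt, this]

theorem pv_dw_head (l : List Int) (x : Int) (hs : l.Pairwise (· < ·)) (hx : x ∈ l) :
    ∃ rest, l.dropWhile (fun i => decide (i < x)) = x :: rest := by
  induction l with
  | nil => cases hx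
  | cons y ys ih =>
    rcases List.pairwise_cons.mp hs with ⟨hy, hys⟩
    rw [List.dropWhile_cons]
    rcases List.mem_cons.mp hx with rfl | hx'
    · simp only [lt_irrefl, decide_false]
      exact ⟨ys, rfl⟩
    · have hlt : y < x := hy x hx'
      simp only [hlt, decide_true, if_true]
      exact ih hys hx'

theorem pv_dw_trans (l : List Int) (t1 t2 : Int) (h : t1 ≤ t2) :
    l.dropWhile (fun i => decide (i < t2)) =
      (l.dropWhile (fun i => decide (i < t1))).dropWhile (fun i => decide (i < t2)) := by
  induction l with
  | nil => rfl
  | cons x xs ih =>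
    rw [List.dropWhile_cons, List.dropWhile_cons]
    by_cases h1 : x < t1
    · have h2 : x < t2 := lt_of_lt_of_le h1 h
      simp only [h1, h2, decide_true, if_true]
      exact ih
    · simp [h1, List.dropWhile_cons]

theorem pvFind_ge (columna : List Int) : ∀ (fuel p : Nat), p ≤ pvFind columna fuel p := by
  intro fuel
  induction fuel with
  | zero => intro p; exact le_refl p
  | succ f ih =>
    intro p
    rw [pvFind]
    split
    · split
      · exact le_trans (by omega) (ih (p + 1))
      · exact le_refl p
    · exact le_refl p

-- the inner while loop finds exactly the head of the ≥ p suffix of the non-zero indices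
theorem pv_find_dw (columna : List Int) : ∀ (fuel p : Nat), columna.length ≤ p + fuel →
    (columna.length ≤ pvFind columna fuel p ∧
        (pvNonzeros columna).dropWhile (fun i => decide (i < (p : Int))) = [])
    ∨ (pvFind columna fuel p < columna.length ∧
        ∃ rest, (pvNonzeros columna).dropWhile (fun i => decide (i < (p : Int)))
          = ((pvFind columna fuel p : Int)) :: rest) := by
  intro fuel
  induction fuel with
  | zero =>
    intro p hf
    left
    refine ⟨by simpa [pvFind] using hf, pv_dw_nil _ _ ?_⟩
    intro i hi
    obtain ⟨j, hj, rfl, _⟩ := (pv_nz_mem _ _).mp hi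
    exact_mod_cast (by omega : j < p)
  | succ f ih =>
    intro p hf
    by_cases h : p < columna.length
    · by_cases hz : columna.getD p 0 = 0
      · have hfe : pvFind columna (f + 1) p = pvFind columna f (p + 1) := by
          rw [pvFind, if_pos h, if_pos hz]
        have hnm : ((p : Int)) ∉ pvNonzeros columna := by
          rw [pv_nz_mem]
          rintro ⟨j, hj, hji, hnz⟩
          have : p = j := by exact_mod_cast hji
          subst this
          exact hnz hz
        have hdw := pv_dw_skip (pvNonzeros columna) (p : Int) hnm
        have hc : ((p : Int) + 1) = (((p + 1 : Nat)) : Int) := by push_cast; ring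
        rw [hfe, hdw, hc]
        exact ih (p + 1) (by omega)
      · have hfe : pvFind columna (f + 1) p = p := by rw [pvFind, if_pos h, if_neg hz]
        have hm : ((p : Int)) ∈ pvNonzeros columna := by
          rw [pv_nz_mem]
          exact ⟨p, h, rfl, hz⟩
        right
        rw [hfe]
        exact ⟨h, pv_dw_head _ _ (pv_nz_sorted columna) hm⟩
    · have hfe : pvFind columna (f + 1) p = p := by rw [pvFind, if_neg h]
      left
      rw [hfe]
      refine ⟨by omega, pv_dw_nil _ _ ?_⟩
      intro i hi
      obtain ⟨j, hj, rfl, _⟩ := (pv_nz_mem _ _).mp hi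
      exact_mod_cast (by omega : j < p)

theorem pv_greedy_of_le (l : List Int) (n d : Int) (picos : List Int)
    (h : n ≤ PySem.List.len picos) : pvGreedy l n d picos = picos := by
  cases l with
  | nil => rfl
  | cons x xs => rw [pvGreedy, if_pos h]

-- skipping: candidates failing the distance condition may be dropped up front
theorem pv_gskip (n d : Int) (l : List Int) : ∀ (picos : List Int) (t : Int),
    (∀ i ∈ l, i < t → ¬ (picos = [] ∨ d ≤ i - PySem.List.pyGetD picos (-1) 0)) →
    pvGreedy l n d picos = pvGreedy (l.dropWhile (fun i => decide (i < t))) n d picos := by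
  induction l with
  | nil => intro picos t _; rfl
  | cons x xs ih =>
    intro picos t h
    rw [List.dropWhile_cons]
    by_cases hx : x < t
    · have hnc := h x List.mem_cons_self hx
      simp only [hx, decide_true, if_true]
      rw [pvGreedy]
      by_cases hn : n ≤ PySem.List.len picos
      · rw [if_pos hn, pv_greedy_of_le _ _ _ _ hn]
      · rw [if_neg hn, if_neg hnc]
        exact ih picos t (fun i hi => h i (List.mem_cons_of_mem _ hi))
    · simp [hx]

-- the outer while loop agrees with the greedy pass over the remaining candidates
theorem pv_main (columna : List Int) (n d : Int) :
    ∀ (fuel p : Nat) (picos : List Int), columna.length < p + fuel →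
    (∀ i ∈ pvNonzeros columna, (p : Int) ≤ i →
        (picos = [] ∨ d ≤ i - PySem.List.pyGetD picos (-1) 0)) →
    pvLoop columna n d fuel picos p =
      pvGreedy ((pvNonzeros columna).dropWhile (fun i => decide (i < (p : Int)))) n d picos := by
  intro fuel
  induction fuel with
  | zero =>
    intro p picos hk _
    have hnil : (pvNonzeros columna).dropWhile (fun i => decide (i < (p : Int))) = [] := by
      refine pv_dw_nil _ _ ?_
      intro i hi
      obtain ⟨j, hj, rfl, _⟩ := (pv_nz_mem _ _).mp hi
      exact_mod_cast (by omega : j < p)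
    rw [pvLoop, hnil]
    rfl
  | succ f ih =>
    intro p picos hk hc
    have hfuel : columna.length ≤ p + (columna.length - p) := by omega
    rcases pv_find_dw columna (columna.length - p) p hfuel with ⟨hge, hnil⟩ | ⟨hlt, rest, hcons⟩
    · rw [pvLoop, hnil]
      simp [hge, pvGreedy]
    · have hpq : p ≤ pvFind columna (columna.length - p) p := pvFind_ge columna _ p
      by_cases hn : PySem.List.len picos < n
      · rw [pvLoop]
        rw [if_pos hn, if_neg (by omega : ¬ columna.length ≤ pvFind columna (columna.length - p) p)]
        rw [hcons, pvGreedy, if_neg (by omega : ¬ n ≤ PySem.List.len picos)]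
        have hqmem : ((pvFind columna (columna.length - p) p : Int)) ∈ pvNonzeros columna := by
          have hmem : ((pvFind columna (columna.length - p) p : Int)) ∈
              (pvNonzeros columna).dropWhile (fun i => decide (i < (p : Int))) := by
            rw [hcons]; exact List.mem_cons_self
          exact (List.dropWhile_sublist _).subset hmem
        have hcondq := hc _ hqmem (by exact_mod_cast hpq)
        rw [if_pos hcondq]
        have hst := pvStepSize_pos d
        have hstc : 1 < d → ((pvStepSize d : Nat) : Int) = d := by
          intro hd; unfold pvStepSize; rw [if_pos hd]; omega
        have hst1 : ¬ 1 < d → pvStepSize d = 1 := by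
          intro hd; unfold pvStepSize; rw [if_neg hd]
        have hsuffpw : ((pvFind columna (columna.length - p) p : Int) :: rest).Pairwise (· < ·) := by
          rw [← hcons]
          exact (pv_nz_sorted columna).sublist (List.dropWhile_sublist _)
        have hrest_gt : ∀ i ∈ rest, ((pvFind columna (columna.length - p) p : Int)) < i :=
          (List.pairwise_cons.mp hsuffpw).1
        -- new invariant for the recursive call
        have hc' : ∀ i ∈ pvNonzeros columna,
            (((pvFind columna (columna.length - p) p + pvStepSize d : Nat)) : Int) ≤ i →
            (picos ++ [(pvFind columna (columna.length - p) p : Int)] = [] ∨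
              d ≤ i - PySem.List.pyGetD (picos ++ [(pvFind columna (columna.length - p) p : Int)]) (-1) 0) := by
          intro i _ hge'
          right
          rw [pv_getD_neg_one_append]
          by_cases hd : 1 < d
          · have := hstc hd
            push_cast at hge' ⊢
            omega
          · have := hst1 hd
            push_cast at hge' ⊢
            omega
        rw [ih (pvFind columna (columna.length - p) p + pvStepSize d)
              (picos ++ [(pvFind columna (columna.length - p) p : Int)]) (by omega) hc']
        -- rewrite the suffix at the new threshold down to `rest`
        have hlt' : ((pvFind columna (columna.length - p) p : Int)) <
            (((pvFind columna (columna.length - p) p + pvStepSize d : Nat)) : Int) := by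
          push_cast; omega
        have h1 : (pvNonzeros columna).dropWhile
              (fun i => decide (i < (((pvFind columna (columna.length - p) p + pvStepSize d : Nat)) : Int)))
            = rest.dropWhile
              (fun i => decide (i < (((pvFind columna (columna.length - p) p + pvStepSize d : Nat)) : Int))) := by
          rw [pv_dw_trans _ ((p : Nat) : Int) _ (by push_cast; omega), hcons,
            List.dropWhile_cons]
          rw [if_pos (decide_eq_true hlt')]
        rw [h1]
        -- and drop the skipped candidates from the greedy pass
        refine (pv_gskip n d rest _ _ ?_).symm
        intro i hi hilt hcond
        rcases hcond with hnil' | hd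
        · exact absurd hnil' (by simp)
        · rw [pv_getD_neg_one_append] at hd
          have hgt := hrest_gt i hi
          by_cases hd1 : 1 < d
          · have := hstc hd1
            push_cast at hilt
            omega
          · have := hst1 hd1
            push_cast at hilt
            omega
      · rw [pvLoop, if_neg hn, hcons, pvGreedy, if_pos (by omega : n ≤ PySem.List.len picos)]

-- ===== VERDICT (by name: the statement is the Claim_ definition above) =====
theorem detectar_picos_spec : Claim_equal_detectar_picos := by
  intro columna n d _hdom
  unfold Spec_detectar_picos detectar_picos_alt
  rw [pv_A_eq_greedy]
  rw [pv_main columna n d (columna.length + 1) 0 [] (by omega) (fun i _ _ => Or.inl rfl)]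
  have h0 : (pvNonzeros columna).dropWhile (fun i => decide (i < ((0 : Nat) : Int)))
      = pvNonzeros columna := by
    refine pv_dw_all _ _ ?_
    intro i hi
    obtain ⟨j, _, rfl, _⟩ := (pv_nz_mem _ _).mp hi
    push_cast
    omega
  rw [h0]
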